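-- pv_equiv track=rewrite | github.com/aleolidev/tilemonstudio | compresor_paletas_jasón/ikacito3.py | comprobar_paletas
-- ===== SOURCE A (Python) =====
-- def comprobar_paletas(paletas, tiles):
--     for tile in tiles:
--         for paleta in paletas:
--             if set(tile) == set(paleta).intersection(tile):
--                 break
--         else:
--             return False
--     return True
-- ===== SOURCE B (Python) =====
-- def comprobar_paletas(paletas, tiles):
--     # Inverted index: element -> set of palette indices containing it.
--     index = {}
--     for i, paleta in enumerate(paletas):
--         for x in paleta:
--             index.setdefault(x, set()).add(i)
--     all_idx = set(range(len(paletas)))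
--     for tile in tiles:
--         cand = all_idx
--         for x in tile:
--             cand = cand & index.get(x, set())
--         if not cand:
--             return False
--     return True
-- ===== Notes on version B (the rewrite author's own statement) =====
-- stated objective: alternative
-- what changed: Replaces the per-tile scan over all palettes (set equality with an intersection) by an inverted index from element to the set of palette indices containing it, built once; a tile is covered iff the intersection of its elements' index-sets (seeded with all palette indices) is non-empty.
import Mathlib
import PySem

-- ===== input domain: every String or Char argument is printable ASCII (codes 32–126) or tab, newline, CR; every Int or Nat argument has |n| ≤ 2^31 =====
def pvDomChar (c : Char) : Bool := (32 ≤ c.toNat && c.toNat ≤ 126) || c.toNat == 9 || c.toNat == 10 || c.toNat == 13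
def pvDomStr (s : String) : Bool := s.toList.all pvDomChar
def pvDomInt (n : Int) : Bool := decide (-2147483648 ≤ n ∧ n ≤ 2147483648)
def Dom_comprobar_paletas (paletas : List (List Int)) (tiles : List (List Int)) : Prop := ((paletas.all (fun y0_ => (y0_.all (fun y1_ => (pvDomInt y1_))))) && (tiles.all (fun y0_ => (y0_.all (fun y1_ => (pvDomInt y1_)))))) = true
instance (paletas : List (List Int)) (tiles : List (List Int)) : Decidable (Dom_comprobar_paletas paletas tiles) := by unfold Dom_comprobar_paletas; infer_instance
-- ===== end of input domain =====

-- B replaces A's per-tile scan over all palettes by an inverted index (element -> set of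
-- palette indices), a tile being covered iff the intersection of its elements' index-sets
-- is non-empty; objective: alternative algorithm.

-- ===== PORT A =====
-- for tile in tiles: for paleta in paletas: if set(tile) == set(paleta) & tile: break / else return False
def comprobar_paletas (paletas : List (List Int)) (tiles : List (List Int)) : Bool :=
  match tiles with
  | [] => true
  | tile :: rest =>
      if paletas.any (fun paleta =>
          PySem.Set.equal (PySem.Set.ofList tile)
            (PySem.Set.inter (PySem.Set.ofList paleta) tile)) then
        comprobar_paletas paletas rest
      else
        false

-- ===== PORT B =====
-- index.setdefault(x, set()).add(i)  ==  d[x] = d.get(x, set()) ∪ {i}  ==  Dict.modify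
def pvBuildIndex (paletas : List (List Int)) : PySem.Dict Int (PySem.Set Int) :=
  (PySem.List.enumerate paletas).foldl
    (fun d ip => ip.2.foldl
      (fun d x => d.modify x [] (fun s => PySem.Set.add s ip.1)) d)
    PySem.Dict.empty

-- the loop 'for tile in tiles: … if not cand: return False' / 'return True'
def pvCheckTiles (index : PySem.Dict Int (PySem.Set Int)) (allIdx : PySem.Set Int)
    (tiles : List (List Int)) : Bool :=
  match tiles with
  | [] => true
  | tile :: rest =>
      let cand := tile.foldl (fun c x => PySem.Set.inter c (index.getD x [])) allIdx
      if cand.isEmpty then false else pvCheckTiles index allIdx rest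

def comprobar_paletas_alt (paletas : List (List Int)) (tiles : List (List Int)) : Bool :=
  let index := pvBuildIndex paletas
  let allIdx := PySem.Set.ofList (PySem.List.pyRange 0 (paletas.length) 1)
  pvCheckTiles index allIdx tiles

-- ===== PRECONDITION & SPEC =====
def Spec_comprobar_paletas (paletas : List (List Int)) (tiles : List (List Int)) (out : Bool) : Prop := out = comprobar_paletas_alt paletas tiles
instance (paletas : List (List Int)) (tiles : List (List Int)) (out : Bool) : Decidable (Spec_comprobar_paletas paletas tiles out) := by unfold Spec_comprobar_paletas; infer_instance

-- ===== CLAIM (what is proved, stated in full; the proofs are below) =====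
def Claim_equal_comprobar_paletas : Prop := ∀ (paletas : List (List Int)) (tiles : List (List Int)), Dom_comprobar_paletas paletas tiles → Spec_comprobar_paletas paletas tiles (comprobar_paletas paletas tiles)

-- ===== LEMMAS AND PROOFS =====

-- one palette's inner loop: what ends up in the index-set of x
theorem pv_inner_mem (xs : List Int) (d : PySem.Dict Int (PySem.Set Int)) (i j x : Int) :
    j ∈ (xs.foldl (fun d y => d.modify y [] (fun s => PySem.Set.add s i)) d).getD x []
      ↔ j ∈ d.getD x [] ∨ (j = i ∧ x ∈ xs) := by
  induction xs generalizing d with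
  | nil => simp
  | cons y ys ih =>
      simp only [List.foldl_cons, ih, PySem.Dict.getD_modify, List.mem_cons]
      by_cases h : x = y
      · subst h
        simp [PySem.Set.mem_add]
        tauto
      · simp [h]

-- the whole index-building loop
theorem pv_index_mem (l : List (Int × List Int)) (d : PySem.Dict Int (PySem.Set Int)) (j x : Int) :
    j ∈ (l.foldl (fun d ip => ip.2.foldl
          (fun d y => d.modify y [] (fun s => PySem.Set.add s ip.1)) d) d).getD x []
      ↔ j ∈ d.getD x [] ∨ ∃ p ∈ l, j = p.1 ∧ x ∈ p.2 := by
  induction l generalizing d with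
  | nil => simp
  | cons p ps ih =>
      simp only [List.foldl_cons, ih, pv_inner_mem, List.mem_cons]
      constructor
      · rintro ((h | h) | ⟨q, hq, h⟩)
        · exact Or.inl h
        · exact Or.inr ⟨p, Or.inl rfl, h⟩
        · exact Or.inr ⟨q, Or.inr hq, h⟩
      · rintro (h | ⟨q, (rfl | hq), h⟩)
        · exact Or.inl (Or.inl h)
        · exact Or.inl (Or.inr h)
        · exact Or.inr ⟨q, hq, h⟩

theorem pvBuildIndex_mem (paletas : List (List Int)) (j x : Int) :
    j ∈ (pvBuildIndex paletas).getD x []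
      ↔ ∃ k : Nat, ∃ h : k < paletas.length, j = (k : Int) ∧ x ∈ paletas[k] := by
  unfold pvBuildIndex
  rw [pv_index_mem]
  simp only [PySem.Dict.getD_empty, List.not_mem_nil, false_or]
  constructor
  · rintro ⟨p, hp, hj, hx⟩
    rcases (PySem.List.mem_enumerate_iff _ _ _).mp hp with ⟨k, hk, rfl⟩
    exact ⟨k, hk, by simpa using hj, by simpa using hx⟩
  · rintro ⟨k, hk, hj, hx⟩
    exact ⟨((k : Int), paletas[k]), (PySem.List.mem_enumerate_iff _ _ _).mpr ⟨k, hk, by simp⟩, hj, hx⟩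

-- the per-tile intersection loop
theorem pv_cand_mem (tile : List Int) (index : PySem.Dict Int (PySem.Set Int))
    (c0 : PySem.Set Int) (j : Int) :
    j ∈ tile.foldl (fun c x => PySem.Set.inter c (index.getD x [])) c0
      ↔ j ∈ c0 ∧ ∀ x ∈ tile, j ∈ index.getD x [] := by
  induction tile generalizing c0 with
  | nil => simp
  | cons y ys ih =>
      simp only [List.foldl_cons, ih, PySem.Set.mem_inter, List.mem_cons]
      constructor
      · rintro ⟨⟨h1, h2⟩, h3⟩
        exact ⟨h1, fun x hx => hx.elim (fun e => e ▸ h2) (h3 x)⟩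
      · rintro ⟨h1, h2⟩
        exact ⟨⟨h1, h2 y (Or.inl rfl)⟩, fun x hx => h2 x (Or.inr hx)⟩

-- A's per-tile condition: some palette contains every element of the tile
theorem pv_any_iff (paletas : List (List Int)) (tile : List Int) :
    (paletas.any (fun paleta =>
        PySem.Set.equal (PySem.Set.ofList tile)
          (PySem.Set.inter (PySem.Set.ofList paleta) tile)) = true)
      ↔ ∃ p ∈ paletas, ∀ x ∈ tile, x ∈ p := by
  simp only [List.any_eq_true, PySem.Set.equal_iff, PySem.Set.mem_inter, PySem.Set.mem_ofList]
  constructor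
  · rintro ⟨p, hp, h⟩
    exact ⟨p, hp, fun x hx => ((h x).mp hx).1⟩
  · rintro ⟨p, hp, h⟩
    exact ⟨p, hp, fun x => ⟨fun hx => ⟨h x hx, hx⟩, fun hx => hx.2⟩⟩

-- B's per-tile condition is the same statement
theorem pv_cand_nonempty (paletas : List (List Int)) (tile : List Int) :
    ((tile.foldl (fun c x => PySem.Set.inter c ((pvBuildIndex paletas).getD x []))
        (PySem.Set.ofList (PySem.List.pyRange 0 (paletas.length) 1))).isEmpty = false)
      ↔ ∃ p ∈ paletas, ∀ x ∈ tile, x ∈ p := by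
  rw [List.isEmpty_eq_false_iff_exists_mem]
  constructor
  · rintro ⟨j, hj⟩
    rw [pv_cand_mem] at hj
    obtain ⟨hj0, hall⟩ := hj
    rw [PySem.Set.mem_ofList, PySem.List.mem_pyRange_one] at hj0
    refine ⟨paletas[j.toNat]'(by omega), List.getElem_mem _, fun x hx => ?_⟩
    rcases (pvBuildIndex_mem paletas j x).mp (hall x hx) with ⟨k, hk, hjk, hxk⟩
    have : j.toNat = k := by omega
    simpa [this] using hxk
  · rintro ⟨p, hp, h⟩
    rcases List.mem_iff_getElem.mp hp with ⟨k, hk, rfl⟩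
    refine ⟨(k : Int), ?_⟩
    rw [pv_cand_mem]
    refine ⟨?_, fun x hx => (pvBuildIndex_mem paletas _ x).mpr ⟨k, hk, rfl, h x hx⟩⟩
    rw [PySem.Set.mem_ofList, PySem.List.mem_pyRange_one]
    constructor <;> [positivity; exact_mod_cast hk]

theorem pv_main (paletas : List (List Int)) (tiles : List (List Int)) :
    comprobar_paletas paletas tiles = comprobar_paletas_alt paletas tiles := by
  show comprobar_paletas paletas tiles
      = pvCheckTiles (pvBuildIndex paletas)
          (PySem.Set.ofList (PySem.List.pyRange 0 (paletas.length) 1)) tiles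
  induction tiles with
  | nil => rfl
  | cons tile rest ih =>
      rw [comprobar_paletas, pvCheckTiles]
      by_cases h : ∃ p ∈ paletas, ∀ x ∈ tile, x ∈ p
      · rw [if_pos ((pv_any_iff paletas tile).mpr h), ih,
          if_neg (by simp [(pv_cand_nonempty paletas tile).mpr h])]
      · have hA : ¬ _ = true := fun hc => h ((pv_any_iff paletas tile).mp hc)
        have hB : ¬ _ = false := fun hc => h ((pv_cand_nonempty paletas tile).mp hc)
        rw [if_neg hA, if_pos (by simpa using hB)]

-- ===== VERDICT (by name: the statement is the Claim_ definition above) =====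
theorem comprobar_paletas_spec : Claim_equal_comprobar_paletas := by
  intro paletas tiles _
  exact pv_main paletas tiles
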